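-- pv_equiv track=rewrite | github.com/trent3677/CosmereRPG | utils/compression/agnostic_conglomerator.py | drop_temp_conglomerates
-- ===== SOURCE A (Python) =====
-- from typing import List, Dict, Any, Tuple, Optional
--
-- def drop_temp_conglomerates(messages: List[Dict[str, Any]]) -> List[Dict[str, Any]]:
--     out: List[Dict[str, Any]] = []
--     skip_next_assistant = False
--     for m in messages:
--         if m.get("role") == "user" and "=== TEMP_CONGLOMERATE_START ===" in m.get("content", ""):
--             skip_next_assistant = True
--             continue
--         if skip_next_assistant and m.get("role") == "assistant":
--             skip_next_assistant = False
--             continue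
--         out.append(m)
--     return out
-- ===== SOURCE B (Python) =====
-- from typing import List, Dict, Any
--
-- _MARKER = "=== TEMP_CONGLOMERATE_START ==="
--
--
-- def _is_marker(m: Dict[str, Any]) -> bool:
--     return m.get("role") == "user" and _MARKER in m.get("content", "")
--
--
-- def _remove_first_assistant(seg: List[Dict[str, Any]]) -> List[Dict[str, Any]]:
--     kept: List[Dict[str, Any]] = []
--     removed = False
--     for m in seg:
--         if not removed and m.get("role") == "assistant":
--             removed = True
--         else:
--             kept.append(m)
--     return kept
--
--
-- def drop_temp_conglomerates(messages: List[Dict[str, Any]]) -> List[Dict[str, Any]]: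
--     # Split the conversation at marker messages (markers discarded), then
--     # rebuild: the leading segment is kept whole, every later segment loses
--     # its first assistant message.
--     segments: List[List[Dict[str, Any]]] = []
--     cur: List[Dict[str, Any]] = []
--     for m in messages:
--         if _is_marker(m):
--             segments.append(cur)
--             cur = []
--         else:
--             cur.append(m)
--     segments.append(cur)
--     out = list(segments[0])
--     for seg in segments[1:]:
--         out.extend(_remove_first_assistant(seg))
--     return out
-- ===== Notes on version B (the rewrite author's own statement) =====
-- stated objective: alternative
-- what changed: A's single pass with a skip_next_assistant boolean flag is replaced by a split-and-rebuild decomposition: one pass splits the conversation into segments at marker messages (discarding the markers), then the output is the first segment followed by each later segment with its first assistant message removed.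
import Mathlib
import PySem

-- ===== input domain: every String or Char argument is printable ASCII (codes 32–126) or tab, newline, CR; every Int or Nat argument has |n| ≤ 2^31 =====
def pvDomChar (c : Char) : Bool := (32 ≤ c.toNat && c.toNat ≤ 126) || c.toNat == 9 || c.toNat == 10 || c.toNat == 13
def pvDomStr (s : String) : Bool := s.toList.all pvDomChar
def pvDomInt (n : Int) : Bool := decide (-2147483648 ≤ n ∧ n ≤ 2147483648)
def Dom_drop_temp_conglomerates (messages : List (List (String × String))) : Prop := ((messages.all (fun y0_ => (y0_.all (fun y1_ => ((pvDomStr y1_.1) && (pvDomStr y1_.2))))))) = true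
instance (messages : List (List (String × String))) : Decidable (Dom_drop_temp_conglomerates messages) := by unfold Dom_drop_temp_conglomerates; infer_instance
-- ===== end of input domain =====

-- B replaces A's boolean-flag single pass by a split-at-markers pass plus a rebuild that
-- removes the first assistant message of each post-marker segment (objective: alternative
-- decomposition, same cost).

-- ===== PORT A =====
-- Transliteration of A: one fold over messages carrying (out, skip_next_assistant).
def drop_temp_conglomerates (messages : List (List (String × String))) : List (List (String × String)) :=
  (messages.foldl
    (fun (st : List (List (String × String)) × Bool) m =>
      if (PySem.Dict.get? (PySem.Dict.mk m) "role" == some "user")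
          && PySem.Str.isIn "=== TEMP_CONGLOMERATE_START ===" (PySem.Dict.getD (PySem.Dict.mk m) "content" "") then
        (st.1, true)
      else if st.2 && (PySem.Dict.get? (PySem.Dict.mk m) "role" == some "assistant") then
        (st.1, false)
      else
        (st.1 ++ [m], st.2))
    (([] : List (List (String × String))), false)).1

-- ===== PORT B =====
-- B-side helpers (Source B's _is_marker and _remove_first_assistant)
def pvIsMarker (m : List (String × String)) : Bool :=
  (PySem.Dict.get? (PySem.Dict.mk m) "role" == some "user")
    && PySem.Str.isIn "=== TEMP_CONGLOMERATE_START ===" (PySem.Dict.getD (PySem.Dict.mk m) "content" "")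

def pvIsAssistant (m : List (String × String)) : Bool :=
  PySem.Dict.get? (PySem.Dict.mk m) "role" == some "assistant"

def pvRemoveFirstAssistant (seg : List (List (String × String))) : List (List (String × String)) :=
  (seg.foldl
    (fun (st : List (List (String × String)) × Bool) m =>
      if !st.2 && pvIsAssistant m then (st.1, true) else (st.1 ++ [m], st.2))
    (([] : List (List (String × String))), false)).1

def drop_temp_conglomerates_alt (messages : List (List (String × String))) : List (List (String × String)) :=
  let p := messages.foldl
    (fun (st : List (List (List (String × String))) × List (List (String × String))) m =>
      if pvIsMarker m then (st.1 ++ [st.2], []) else (st.1, st.2 ++ [m]))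
    (([] : List (List (List (String × String)))), ([] : List (List (String × String))))
  match p.1 ++ [p.2] with
  | [] => []  -- unreachable: the scrutinee ends with [p.2]
  | s0 :: rest => rest.foldl (fun out seg => out ++ pvRemoveFirstAssistant seg) s0

-- ===== PRECONDITION & SPEC =====
def Spec_drop_temp_conglomerates (messages : List (List (String × String))) (out : List (List (String × String))) : Prop := out = drop_temp_conglomerates_alt messages
instance (messages : List (List (String × String))) (out : List (List (String × String))) : Decidable (Spec_drop_temp_conglomerates messages out) := by unfold Spec_drop_temp_conglomerates; infer_instance

-- ===== CLAIM (what is proved, stated in full; the proofs are below) =====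
def Claim_equal_drop_temp_conglomerates : Prop := ∀ (messages : List (List (String × String))), Dom_drop_temp_conglomerates messages → Spec_drop_temp_conglomerates messages (drop_temp_conglomerates messages)

-- ===== LEMMAS AND PROOFS =====

-- Named versions of the loop bodies (definitionally equal to the lambdas in the ports).
def pvStepA (st : List (List (String × String)) × Bool) (m : List (String × String)) : List (List (String × String)) × Bool :=
  if (PySem.Dict.get? (PySem.Dict.mk m) "role" == some "user")
      && PySem.Str.isIn "=== TEMP_CONGLOMERATE_START ===" (PySem.Dict.getD (PySem.Dict.mk m) "content" "") then
    (st.1, true)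
  else if st.2 && (PySem.Dict.get? (PySem.Dict.mk m) "role" == some "assistant") then
    (st.1, false)
  else
    (st.1 ++ [m], st.2)

def pvStepS (st : List (List (List (String × String))) × List (List (String × String))) (m : List (String × String)) :
    List (List (List (String × String))) × List (List (String × String)) :=
  if pvIsMarker m then (st.1 ++ [st.2], []) else (st.1, st.2 ++ [m])

def pvStepR (st : List (List (String × String)) × Bool) (m : List (String × String)) : List (List (String × String)) × Bool :=
  if !st.2 && pvIsAssistant m then (st.1, true) else (st.1 ++ [m], st.2)

theorem pvStepA_eq (st : List (List (String × String)) × Bool) (m : List (String × String)) :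
    pvStepA st m = if pvIsMarker m then (st.1, true)
      else if st.2 && pvIsAssistant m then (st.1, false) else (st.1 ++ [m], st.2) := rfl

-- A's loop, written as direct structural recursion on the message list.
def pvGoA : List (List (String × String)) → Bool → List (List (String × String))
  | [], _ => []
  | m :: rest, flag =>
    if pvIsMarker m then pvGoA rest true
    else if flag && pvIsAssistant m then pvGoA rest false
    else m :: pvGoA rest flag

theorem pvA_foldl (msgs : List (List (String × String))) :
    ∀ (out : List (List (String × String))) (flag : Bool),
    (msgs.foldl pvStepA (out, flag)).1 = out ++ pvGoA msgs flag := by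
  induction msgs with
  | nil => intro out flag; simp [pvGoA]
  | cons m rest ih =>
    intro out flag
    rw [List.foldl_cons, pvStepA_eq]
    simp only [pvGoA]
    split_ifs with h1 h2
    · exact ih out true
    · exact ih out false
    · rw [ih (out ++ [m]) flag, List.append_assoc, List.singleton_append]

-- B's splitting loop, as direct recursion carrying the current segment.
def pvSplitRec : List (List (String × String)) → List (List (String × String)) → List (List (List (String × String)))
  | cur, [] => [cur]
  | cur, m :: rest => if pvIsMarker m then cur :: pvSplitRec [] rest else pvSplitRec (cur ++ [m]) rest

theorem pvSplit_foldl (msgs : List (List (String × String))) :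
    ∀ (segs : List (List (List (String × String)))) (cur : List (List (String × String))),
    (msgs.foldl pvStepS (segs, cur)).1 ++ [(msgs.foldl pvStepS (segs, cur)).2]
      = segs ++ pvSplitRec cur msgs := by
  induction msgs with
  | nil => intro segs cur; simp [pvSplitRec]
  | cons m rest ih =>
    intro segs cur
    rw [List.foldl_cons]
    simp only [pvStepS, pvSplitRec]
    split_ifs with h
    · rw [ih (segs ++ [cur]) [], List.append_assoc, List.singleton_append]
    · exact ih segs (cur ++ [m])

theorem pvSplitRec_ne_nil (msgs cur : List (List (String × String))) : pvSplitRec cur msgs ≠ [] := by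
  induction msgs generalizing cur with
  | nil => simp [pvSplitRec]
  | cons m rest ih => simp only [pvSplitRec]; split_ifs <;> simp [ih]

theorem pvSplitRec_modifyHead (msgs : List (List (String × String))) :
    ∀ cur, pvSplitRec cur msgs = (pvSplitRec [] msgs).modifyHead (cur ++ ·) := by
  induction msgs with
  | nil => intro cur; simp [pvSplitRec]
  | cons m rest ih =>
    intro cur
    simp only [pvSplitRec, List.nil_append]
    split_ifs with h
    · simp
    · rw [ih (cur ++ [m]), ih [m]]
      rcases hs : pvSplitRec [] rest with _ | ⟨hh, t⟩
      · exact absurd hs (pvSplitRec_ne_nil rest [])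
      · simp

-- remove-first-assistant, as direct recursion.
def pvRfa : List (List (String × String)) → List (List (String × String))
  | [] => []
  | m :: rest => if pvIsAssistant m then rest else m :: pvRfa rest

theorem pvRfa_foldl_true (seg : List (List (String × String))) :
    ∀ kept, (seg.foldl pvStepR (kept, true)).1 = kept ++ seg := by
  induction seg with
  | nil => intro kept; simp
  | cons m rest ih =>
    intro kept
    rw [List.foldl_cons]
    have : pvStepR (kept, true) m = (kept ++ [m], true) := by simp [pvStepR]
    rw [this, ih (kept ++ [m]), List.append_assoc, List.singleton_append]

theorem pvRfa_foldl_false (seg : List (List (String × String))) :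
    ∀ kept, (seg.foldl pvStepR (kept, false)).1 = kept ++ pvRfa seg := by
  induction seg with
  | nil => intro kept; simp [pvRfa]
  | cons m rest ih =>
    intro kept
    rw [List.foldl_cons]
    simp only [pvRfa]
    by_cases h : pvIsAssistant m = true
    · have : pvStepR (kept, false) m = (kept, true) := by simp [pvStepR, h]
      rw [this, pvRfa_foldl_true rest kept, if_pos h]
    · have : pvStepR (kept, false) m = (kept ++ [m], false) := by simp [pvStepR, h]
      rw [this, ih (kept ++ [m]), if_neg h, List.append_assoc, List.singleton_append]

theorem pvRemoveFirstAssistant_eq (seg : List (List (String × String))) :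
    pvRemoveFirstAssistant seg = pvRfa seg := by
  have h := pvRfa_foldl_false seg []
  rw [List.nil_append] at h
  exact h

theorem pvOut_foldl (segs : List (List (List (String × String)))) :
    ∀ out, segs.foldl (fun out seg => out ++ pvRemoveFirstAssistant seg) out
      = out ++ (segs.map pvRfa).flatten := by
  induction segs with
  | nil => intro out; simp
  | cons s rest ih =>
    intro out
    rw [List.foldl_cons, ih, pvRemoveFirstAssistant_eq]
    simp

-- Main invariant: A's flag machine equals "split at markers, remove first assistant per later segment".
theorem pvMain (msgs : List (List (String × String))) :
    pvGoA msgs false = (pvSplitRec [] msgs).headI ++ (((pvSplitRec [] msgs).tail).map pvRfa).flatten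
    ∧ pvGoA msgs true = pvRfa (pvSplitRec [] msgs).headI ++ (((pvSplitRec [] msgs).tail).map pvRfa).flatten := by
  induction msgs with
  | nil => simp [pvGoA, pvSplitRec, pvRfa]
  | cons m rest ih =>
    rcases hs : pvSplitRec [] rest with _ | ⟨h, t⟩
    · exact absurd hs (pvSplitRec_ne_nil rest [])
    rw [hs] at ih
    by_cases hm : pvIsMarker m = true
    · have hsp : pvSplitRec [] (m :: rest) = [] :: h :: t := by
        simp [pvSplitRec, hm, hs]
      constructor <;> simp [pvGoA, hm, hsp, ih.2, pvRfa]
    · have hsp : pvSplitRec [] (m :: rest) = (m :: h) :: t := by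
        simp only [pvSplitRec, hm, List.nil_append]
        rw [pvSplitRec_modifyHead rest [m], hs]
        simp
      by_cases ha : pvIsAssistant m = true
      · constructor
        · simp [pvGoA, hm, hsp, ih.1]
        · simp [pvGoA, hm, ha, hsp, pvRfa, ih.1]
      · constructor
        · simp [pvGoA, hm, hsp, ih.1]
        · simp [pvGoA, hm, ha, hsp, pvRfa, ih.2]

theorem pvA_eq_goA (messages : List (List (String × String))) :
    drop_temp_conglomerates messages = pvGoA messages false := by
  have h : drop_temp_conglomerates messages = (messages.foldl pvStepA ([], false)).1 := rfl
  rw [h, pvA_foldl messages [] false, List.nil_append]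

theorem pvB_eq (messages : List (List (String × String))) :
    drop_temp_conglomerates_alt messages
      = (pvSplitRec [] messages).headI ++ (((pvSplitRec [] messages).tail).map pvRfa).flatten := by
  have hb : drop_temp_conglomerates_alt messages =
      (match (messages.foldl pvStepS ([], [])).1 ++ [(messages.foldl pvStepS ([], [])).2] with
       | [] => []
       | s0 :: rest => rest.foldl (fun out seg => out ++ pvRemoveFirstAssistant seg) s0) := rfl
  have hsplit := pvSplit_foldl messages [] []
  rw [List.nil_append] at hsplit
  rcases hs : pvSplitRec [] messages with _ | ⟨h, t⟩
  · exact absurd hs (pvSplitRec_ne_nil messages [])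
  rw [hs] at hsplit
  rw [hb, hsplit]
  rw [show (match h :: t with
       | [] => ([] : List (List (String × String)))
       | s0 :: rest => rest.foldl (fun out seg => out ++ pvRemoveFirstAssistant seg) s0)
      = t.foldl (fun out seg => out ++ pvRemoveFirstAssistant seg) h from rfl,
     pvOut_foldl t h]
  simp

-- ===== VERDICT (by name: the statement is the Claim_ definition above) =====
theorem drop_temp_conglomerates_spec : Claim_equal_drop_temp_conglomerates := by
  intro messages _
  unfold Spec_drop_temp_conglomerates
  rw [pvA_eq_goA, pvB_eq]
  exact (pvMain messages).1
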